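-- pv_equiv track=rewrite | github.com/StormGuoson/AGR | learn/codeWar_test.py | song_decoder
-- ===== SOURCE A (Python) =====
-- def song_decoder(song):
--     song = song.replace('WUB', ' ')
--     while song.startswith(' '):
--         song = song[1:]
--     while song.endswith(' '):
--         song = song[:-1]
--     for s in range(len(song), 1, -1):
--         if ' ' * s in song:
--             song = song.replace(' ' * s, ' ')
--     return song
-- ===== SOURCE B (Python) =====
-- def song_decoder(song):
--     s = song.replace('WUB', ' ')
--     out = []
--     for c in s:
--         if c != ' ':
--             out.append(c)
--         elif out and out[-1] != ' ':
--             out.append(' ')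
--     if out and out[-1] == ' ':
--         out.pop()
--     return ''.join(out)
-- ===== Notes on version B (the rewrite author's own statement) =====
-- stated objective: faster
-- what changed: B replaces A's strip-by-repeated-slicing plus the descending loop of longest-run substring replacements (a space-run pattern searched and replaced for every length from len(song) down to 2) with a single left-to-right scan that copies non-space characters and emits at most one separating space using a last-emitted-char check, dropping any trailing space at the end.
import Mathlib
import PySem

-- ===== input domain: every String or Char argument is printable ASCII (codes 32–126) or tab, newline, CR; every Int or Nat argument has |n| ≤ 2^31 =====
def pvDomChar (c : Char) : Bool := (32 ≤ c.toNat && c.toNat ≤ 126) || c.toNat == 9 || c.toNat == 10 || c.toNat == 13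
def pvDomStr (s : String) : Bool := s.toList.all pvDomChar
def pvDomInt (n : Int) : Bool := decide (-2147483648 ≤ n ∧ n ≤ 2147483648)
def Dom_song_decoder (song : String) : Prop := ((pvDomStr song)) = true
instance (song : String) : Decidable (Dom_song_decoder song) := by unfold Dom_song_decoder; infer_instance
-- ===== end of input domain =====

-- B replaces A's repeated longest-run substring replacements by one linear left-to-right scan with a
-- previous-char-was-a-space flag (objective: faster).

-- ===== PORT A =====
-- termination facts for the two while-loops (cited by decreasing_by; the ports' values are untouched)
theorem pvLstripDec (s : String) (h : PySem.Str.startswith s " " = true) :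
    (PySem.Str.slice s (some 1) none).toList.length < s.toList.length := by
  have hp : (" ".toList) <+: s.toList := (PySem.Chars.startswith_iff _ _).mp (by simpa using h)
  have hne : s.toList ≠ [] := by
    intro hnil; rw [hnil] at hp; simpa using hp.length_le
  have heq : (PySem.Str.slice s (some 1) none).toList = s.toList.tail := by
    simp [PySem.List.slice_from_one]
  obtain ⟨a, t, ht⟩ := List.exists_cons_of_ne_nil hne
  rw [heq, ht]; simp

theorem pvRstripDec (s : String) (h : PySem.Str.endswith s " " = true) :
    (PySem.Str.slice s none (some (-1))).toList.length < s.toList.length := by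
  have hp : (" ".toList) <:+ s.toList := (PySem.Chars.endswith_iff _ _).mp (by simpa using h)
  have hne : s.toList ≠ [] := by
    intro hnil; rw [hnil] at hp; simpa using hp.length_le
  rw [PySem.Str.slice_to_neg_one]
  obtain ⟨a, t, ht⟩ := List.exists_cons_of_ne_nil hne
  rw [ht]; simp

-- while song.startswith(' '): song = song[1:]
def pvLstrip (s : String) : String :=
  if h : PySem.Str.startswith s " " = true then pvLstrip (PySem.Str.slice s (some 1) none) else s
termination_by s.toList.length
decreasing_by exact pvLstripDec s h

-- while song.endswith(' '): song = song[:-1]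
def pvRstrip (s : String) : String :=
  if h : PySem.Str.endswith s " " = true then pvRstrip (PySem.Str.slice s none (some (-1))) else s
termination_by s.toList.length
decreasing_by exact pvRstripDec s h

def song_decoder (song : String) : String :=
  let song1 := PySem.Str.replace song "WUB" " "
  let song2 := pvLstrip song1
  let song3 := pvRstrip song2
  -- for s in range(len(song), 1, -1): if ' '*s in song: song = song.replace(' '*s, ' ')
  (PySem.List.pyRange (PySem.Str.len song3) 1 (-1)).foldl
    (fun sng s =>
      -- ' ' * s : str * int on code points via List.pyRepeat (exact)
      let pat := String.ofList (PySem.List.pyRepeat [' '] s)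
      if PySem.Str.isIn pat sng = true then PySem.Str.replace sng pat " " else sng)
    song3

-- ===== PORT B =====
def song_decoder_alt (song : String) : String :=
  let s := PySem.Str.replace song "WUB" " "
  let out := s.toList.foldl
    (fun out c =>
      if c ≠ ' ' then out ++ [c]
      else if out ≠ [] ∧ out.getLast? ≠ some ' ' then out ++ [' ']
      else out) []
  let out := if out ≠ [] ∧ out.getLast? = some ' ' then out.dropLast else out
  -- ''.join(out) over one-character strings = String.ofList (exact)
  String.ofList out

-- ===== PRECONDITION & SPEC =====
def Spec_song_decoder (song : String) (out : String) : Prop := out = song_decoder_alt song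
instance (song : String) (out : String) : Decidable (Spec_song_decoder song out) := by unfold Spec_song_decoder; infer_instance

-- ===== CLAIM (what is proved, stated in full; the proofs are below) =====
def Claim_equal_song_decoder : Prop := ∀ (song : String), Dom_song_decoder song → Spec_song_decoder song (song_decoder song)

-- ===== LEMMAS AND PROOFS =====

-- canonical collapsed form: pvNorm = strip + collapse runs of spaces; pvNormW = same, in "after a word char" state
mutual
def pvNorm : List Char → List Char
  | [] => []
  | c :: t => if c = ' ' then pvNorm t else c :: pvNormW t
def pvNormW : List Char → List Char
  | [] => []
  | c :: t => if c = ' ' then (if pvNorm t = [] then [] else ' ' :: pvNorm t) else c :: pvNormW t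
end

-- B's scan states: pvE = output empty or just emitted a space; pvG = just emitted a word char
mutual
def pvE : List Char → List Char
  | [] => []
  | c :: t => if c = ' ' then pvE t else c :: pvG t
def pvG : List Char → List Char
  | [] => []
  | c :: t => if c = ' ' then ' ' :: pvE t else c :: pvG t
end

-- fuel-free form of Python str.replace with pattern ' '*k, replacement ' '
def pvRep (k : Nat) : List Char → List Char
  | [] => []
  | c :: t =>
    if (List.replicate k ' ').isPrefixOf (c :: t) then ' ' :: pvRep k (t.drop (k-1))
    else c :: pvRep k t
termination_by l => l.length
decreasing_by
  all_goals simp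

-- list-level body of A's final loop
def pvStep (l : List Char) (s : Int) : List Char :=
  if PySem.Chars.isIn (List.replicate s.toNat ' ') l = true
  then PySem.Chars.replace l (List.replicate s.toNat ' ') [' '] else l

theorem pvReplaceGo (k : Nat) (hk : 2 ≤ k) : ∀ fuel (l acc : List Char), l.length ≤ fuel →
    PySem.Chars.replace.go (List.replicate k ' ') [' '] fuel l acc = acc.reverse ++ pvRep k l := by
  intro fuel
  induction fuel with
  | zero =>
    intro l acc hl
    have : l = [] := by cases l <;> simp_all
    subst this
    simp [PySem.Chars.replace.go, pvRep]
  | succ fuel ih =>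
    intro l acc hl
    cases l with
    | nil => simp [PySem.Chars.replace.go, pvRep]
    | cons c t =>
      rw [PySem.Chars.replace.go]
      by_cases hp : (List.replicate k ' ').isPrefixOf (c :: t) = true
      · rw [if_pos hp]
        have hdrop : List.drop (List.replicate k ' ').length (c :: t) = t.drop (k-1) := by
          obtain ⟨j, rfl⟩ : ∃ j, k = j + 1 := ⟨k - 1, by omega⟩
          simp
        rw [hdrop, ih _ _ (by simp at hl ⊢; omega)]
        rw [pvRep, if_pos hp]
        simp
      · rw [if_neg hp, ih _ _ (by simp at hl ⊢; omega)]
        rw [pvRep, if_neg hp]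
        simp

theorem pvReplaceEq (k : Nat) (hk : 2 ≤ k) (l : List Char) :
    PySem.Chars.replace l (List.replicate k ' ') [' '] = pvRep k l := by
  rw [PySem.Chars.replace]
  rw [if_neg (by obtain ⟨j, rfl⟩ : ∃ j, k = j + 2 := ⟨k - 2, by omega⟩; simp [List.replicate_succ])]
  simpa using pvReplaceGo k hk l.length l [] le_rfl

theorem pvInfixRepl {k r : Nat} : (List.replicate k ' ' <:+: List.replicate r ' ') ↔ k ≤ r := by
  constructor
  · intro h
    simpa using h.length_le
  · intro h
    have heq : List.replicate r ' ' = List.replicate k ' ' ++ List.replicate (r-k) ' ' := by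
      rw [← List.replicate_add]; congr 1; omega
    rw [heq]
    exact (List.prefix_append _ _).isInfix

theorem pvPrefixSplit {k : Nat} {xs ys : List Char} {c : Char} (hc : c ≠ ' ') :
    List.replicate k ' ' <+: xs ++ c :: ys → List.replicate k ' ' <+: xs := by
  induction k generalizing xs with
  | zero => intro _; simp
  | succ s ih =>
    intro h
    cases xs with
    | nil =>
      rw [List.replicate_succ] at h
      simp only [List.nil_append, List.cons_prefix_cons] at h
      exact absurd h.1.symm hc
    | cons x xs' =>
      rw [List.replicate_succ] at h
      simp only [List.cons_append, List.cons_prefix_cons] at h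
      rw [List.replicate_succ, List.cons_prefix_cons]
      exact ⟨h.1, ih h.2⟩

theorem pvInfixSplit {k : Nat} {xs ys : List Char} {c : Char} (hc : c ≠ ' ') :
    (List.replicate k ' ' <:+: xs ++ c :: ys) ↔
      (List.replicate k ' ' <:+: xs ∨ List.replicate k ' ' <:+: ys) := by
  constructor
  · induction xs with
    | nil =>
      intro h
      simp only [List.nil_append, List.infix_cons_iff] at h
      rcases h with h | h
      · cases k with
        | zero => exact Or.inl (by simp)
        | succ s =>
          rw [List.replicate_succ, List.cons_prefix_cons] at h
          exact absurd h.1.symm hc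
      · exact Or.inr h
    | cons x xs' ih =>
      intro h
      rw [List.cons_append, List.infix_cons_iff] at h
      rcases h with h | h
      · rw [← List.cons_append] at h
        exact Or.inl (pvPrefixSplit hc h).isInfix
      · rcases ih h with h' | h'
        · exact Or.inl (h'.trans (List.suffix_cons x xs').isInfix)
        · exact Or.inr h'
  · intro h
    rcases h with h | h
    · exact h.trans (List.prefix_append _ _).isInfix
    · exact h.trans ((List.suffix_cons c ys).trans (List.suffix_append _ _)).isInfix

theorem pvDecomp (l : List Char) : ∃ r rest, l = List.replicate r ' ' ++ rest ∧
    (rest = [] ∨ ∃ c u, rest = c :: u ∧ c ≠ ' ') := by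
  induction l with
  | nil => exact ⟨0, [], by simp, Or.inl rfl⟩
  | cons c t ih =>
    by_cases hc : c = ' '
    · obtain ⟨r, rest, heq, hr⟩ := ih
      exact ⟨r + 1, rest, by rw [List.replicate_succ, hc]; simp [heq], hr⟩
    · exact ⟨0, c :: t, by simp, Or.inr ⟨c, t, rfl, hc⟩⟩

theorem pvNormSpApp (r : Nat) (x : List Char) : pvNorm (List.replicate r ' ' ++ x) = pvNorm x := by
  induction r with
  | zero => simp
  | succ s ih => rw [List.replicate_succ]; simpa [pvNorm] using ih

theorem pvNormWSpApp (r : Nat) (hr : 1 ≤ r) (x : List Char) :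
    pvNormW (List.replicate r ' ' ++ x) = if pvNorm x = [] then [] else ' ' :: pvNorm x := by
  obtain ⟨s, rfl⟩ : ∃ s, r = s + 1 := ⟨r - 1, by omega⟩
  rw [List.replicate_succ]
  simp [pvNormW, pvNormSpApp]

theorem pvRepCons {k : Nat} (hk : 1 ≤ k) {c : Char} (hc : c ≠ ' ') (t : List Char) :
    pvRep k (c :: t) = c :: pvRep k t := by
  rw [pvRep]
  rw [if_neg]
  intro h
  rw [List.isPrefixOf_iff_prefix] at h
  obtain ⟨s, rfl⟩ : ∃ s, k = s + 1 := ⟨k - 1, by omega⟩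
  rw [List.replicate_succ, List.cons_prefix_cons] at h
  exact hc h.1.symm

theorem pvRepFull {k : Nat} (hk : 1 ≤ k) (m : List Char) :
    pvRep k (List.replicate k ' ' ++ m) = ' ' :: pvRep k m := by
  obtain ⟨s, rfl⟩ : ∃ s, k = s + 1 := ⟨k - 1, by omega⟩
  rw [List.replicate_succ, List.cons_append, pvRep]
  rw [if_pos]
  · congr 1
    congr 1
    simp only [Nat.add_sub_cancel]
    exact List.drop_left' (by simp)
  · rw [List.isPrefixOf_iff_prefix, List.replicate_succ, List.cons_prefix_cons]
    exact ⟨rfl, List.prefix_append _ _⟩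

theorem pvRepShort {k r : Nat} (hrk : r < k) {c : Char} (hc : c ≠ ' ') (u : List Char) :
    pvRep k (List.replicate r ' ' ++ c :: u) = List.replicate r ' ' ++ c :: pvRep k u := by
  induction r with
  | zero => simpa using pvRepCons (by omega) hc u
  | succ s ih =>
    rw [List.replicate_succ, List.cons_append, pvRep]
    rw [if_neg]
    · rw [ih (by omega), ← List.cons_append, ← List.replicate_succ]
    · intro h
      rw [List.isPrefixOf_iff_prefix] at h
      obtain ⟨j, rfl⟩ : ∃ j, k = j + 1 := ⟨k - 1, by omega⟩
      rw [List.replicate_succ, List.cons_prefix_cons] at h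
      have := pvPrefixSplit hc h.2
      have hlen := this.length_le
      simp at hlen
      omega

theorem pvRepSp {k r : Nat} (hrk : r < k) : pvRep k (List.replicate r ' ') = List.replicate r ' ' := by
  induction r with
  | zero => simp [pvRep]
  | succ s ih =>
    rw [List.replicate_succ, pvRep]
    rw [if_neg]
    · rw [ih (by omega), ← List.replicate_succ]
    · intro h
      rw [List.isPrefixOf_iff_prefix, ← List.replicate_succ] at h
      have := h.length_le
      simp at this
      omega

theorem pvRepNe {k : Nat} (hk : 2 ≤ k) (r : Nat) (c : Char) (u : List Char) (hc : c ≠ ' ') :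
    pvRep k (List.replicate r ' ' ++ c :: u) ≠ [] := by
  rcases Nat.lt_or_ge r k with hr | hr
  · rw [pvRepShort hr hc]
    simp
  · have heq : List.replicate r ' ' = List.replicate k ' ' ++ List.replicate (r-k) ' ' := by
      rw [← List.replicate_add]; congr 1; omega
    rw [heq, List.append_assoc, pvRepFull (by omega)]
    simp

theorem pvNormSp (j : Nat) : pvNorm (List.replicate j ' ') = [] := by
  simpa using pvNormSpApp j []

theorem pvNormWSp (j : Nat) : pvNormW (List.replicate j ' ') = [] := by
  cases j with
  | zero => rfl
  | succ s => rw [show List.replicate (s+1) ' ' = List.replicate (s+1) ' ' ++ [] by simp,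
      pvNormWSpApp _ (by omega)]; simp [pvNorm]

theorem pvRepConsNe (k : Nat) (d : Char) (v : List Char) : pvRep k (d :: v) ≠ [] := by
  rw [pvRep]; split <;> simp

theorem pvRepNorm (k : Nat) (hk : 2 ≤ k) : ∀ n, ∀ l : List Char, l.length ≤ n →
    pvNorm (pvRep k l) = pvNorm l ∧ pvNormW (pvRep k l) = pvNormW l := by
  intro n
  induction n with
  | zero =>
    intro l hl
    have : l = [] := by cases l <;> simp_all
    subst this
    simp [pvRep]
  | succ n ih =>
    intro l hl
    obtain ⟨r, rest, rfl, hrest⟩ := pvDecomp l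
    rcases hrest with rfl | ⟨c, u, rfl, hc⟩
    · -- l is all spaces
      rcases Nat.lt_or_ge r k with hr | hr
      · simp only [List.append_nil]
        rw [pvRepSp hr]
        exact ⟨rfl, rfl⟩
      · have heq : List.replicate r ' ' = List.replicate k ' ' ++ List.replicate (r-k) ' ' := by
          rw [← List.replicate_add]; congr 1; omega
        simp only [List.append_nil]
        rw [heq, pvRepFull (by omega)]
        have hlen : (List.replicate (r-k) ' ').length ≤ n := by
          simp at hl ⊢; omega
        have ihx := ih _ hlen
        constructor
        · simp only [pvNorm]
          rw [if_pos trivial, ihx.1, pvNormSp, ← heq, pvNormSp]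
        · simp only [pvNormW]
          rw [if_pos trivial, ihx.1, pvNormSp, ← heq, pvNormWSp]
          simp
    · -- l = spaces ++ c :: u, c ≠ ' '
      have hul : u.length ≤ n := by simp at hl; omega
      have ihu := ih u hul
      have fact1 : pvNorm (c :: pvRep k u) = pvNorm (c :: u) := by
        simp [pvNorm, hc, ihu.2]
      have fact2 : pvNormW (c :: pvRep k u) = pvNormW (c :: u) := by
        simp [pvNormW, hc, ihu.2]
      rcases Nat.lt_or_ge r k with hr | hr
      · rw [pvRepShort hr hc]
        constructor
        · rw [pvNormSpApp, pvNormSpApp, fact1]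
        · cases r with
          | zero => simpa using fact2
          | succ s =>
            rw [pvNormWSpApp _ (by omega), pvNormWSpApp _ (by omega), fact1]
      · have heq : List.replicate r ' ' = List.replicate k ' ' ++ List.replicate (r-k) ' ' := by
          rw [← List.replicate_add]; congr 1; omega
        rw [heq, List.append_assoc, pvRepFull (by omega)]
        have hlen : (List.replicate (r-k) ' ' ++ c :: u).length ≤ n := by
          simp at hl ⊢; omega
        have ihm := ih _ hlen
        have hnm : pvNorm (List.replicate (r-k) ' ' ++ c :: u) = c :: pvNormW u := by
          rw [pvNormSpApp]; simp [pvNorm, hc]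
        constructor
        · simp only [pvNorm]
          rw [if_pos trivial, ihm.1, hnm, ← List.append_assoc, ← heq, pvNormSpApp]
          simp [pvNorm, hc]
        · simp only [pvNormW]
          rw [if_pos trivial, ihm.1, hnm, ← List.append_assoc, ← heq,
            pvNormWSpApp _ (by omega)]
          simp [pvNorm, hc]

theorem pvRepRun (k : Nat) (hk : 2 ≤ k) : ∀ n, ∀ l : List Char, l.length ≤ n →
    ¬(List.replicate (k+1) ' ' <:+: l) → ¬(List.replicate k ' ' <:+: pvRep k l) := by
  intro n
  induction n with
  | zero =>
    intro l hl _
    have : l = [] := by cases l <;> simp_all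
    subst this
    simp only [pvRep]
    intro h
    have := h.length_le
    simp at this
    omega
  | succ n ih =>
    intro l hl hnr
    obtain ⟨r, rest, rfl, hrest⟩ := pvDecomp l
    rcases hrest with rfl | ⟨c, u, rfl, hc⟩
    · simp only [List.append_nil] at hnr ⊢
      have hrk : r ≤ k := by
        by_contra hgt
        exact hnr (pvInfixRepl.mpr (by omega))
      rcases Nat.lt_or_ge r k with hr | hr
      · rw [pvRepSp hr]
        intro h
        exact absurd (pvInfixRepl.mp h) (by omega)
      · have hrk' : r = k := by omega
        subst hrk'
        rw [show List.replicate r ' ' = List.replicate r ' ' ++ [] by simp, pvRepFull (by omega)]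
        simp only [pvRep]
        intro h
        have := h.length_le
        simp at this
        omega
    · have hrk : r ≤ k := by
        by_contra hgt
        exact hnr ((pvInfixRepl.mpr (show k+1 ≤ r by omega)).trans
          (List.prefix_append _ _).isInfix)
      have hu : ¬(List.replicate (k+1) ' ' <:+: u) := by
        intro h
        exact hnr (h.trans ((List.suffix_cons c u).trans (List.suffix_append _ _)).isInfix)
      have hul : u.length ≤ n := by simp at hl; omega
      have ihu := ih u hul hu
      rcases Nat.lt_or_ge r k with hr | hr
      · rw [pvRepShort hr hc]
        intro h
        rcases (pvInfixSplit hc).mp h with h' | h'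
        · exact absurd (pvInfixRepl.mp h') (by omega)
        · exact ihu h'
      · have hrk' : r = k := by omega
        rw [hrk', pvRepFull (by omega), pvRepCons (by omega) hc]
        intro h
        have h2 : List.replicate k ' ' <:+: [' '] ++ c :: pvRep k u := by simpa using h
        rcases (pvInfixSplit hc).mp h2 with h' | h'
        · have := h'.length_le
          simp at this
          omega
        · exact ihu h'

theorem pvRepHead (k : Nat) (hk : 2 ≤ k) (l : List Char) (h : l.head? ≠ some ' ') :
    (pvRep k l).head? ≠ some ' ' := by
  cases l with
  | nil => simp [pvRep]
  | cons c t =>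
    have hc : c ≠ ' ' := by simpa using h
    rw [pvRepCons (by omega) hc]
    simpa using hc

theorem pvRepLast (k : Nat) (hk : 2 ≤ k) : ∀ n, ∀ l : List Char, l.length ≤ n →
    l.getLast? ≠ some ' ' → (pvRep k l).getLast? ≠ some ' ' := by
  intro n
  induction n with
  | zero =>
    intro l hl _
    have : l = [] := by cases l <;> simp_all
    subst this
    simp [pvRep]
  | succ n ih =>
    intro l hl hlast
    obtain ⟨r, rest, rfl, hrest⟩ := pvDecomp l
    rcases hrest with rfl | ⟨c, u, rfl, hc⟩
    · cases r with
      | zero => simpa [pvRep] using hlast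
      | succ s =>
        exfalso
        apply hlast
        simp only [List.append_nil, List.replicate_succ']
        exact List.getLast?_concat
    · have hlastcu : (c :: u).getLast? = (List.replicate r ' ' ++ c :: u).getLast? :=
        (List.getLast?_append_of_ne_nil _ (by simp)).symm
      rcases Nat.lt_or_ge r k with hr | hr
      · rw [pvRepShort hr hc]
        rw [List.getLast?_append_of_ne_nil _ (by simp)]
        cases u with
        | nil =>
          simp only [pvRep]
          simpa using hc
        | cons d v =>
          have hne : pvRep k (d :: v) ≠ [] := pvRepConsNe k d v
          rw [show c :: pvRep k (d :: v) = [c] ++ pvRep k (d :: v) by simp,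
            List.getLast?_append_of_ne_nil _ hne]
          apply ih (d :: v) (by simp at hl ⊢; omega)
          rw [← List.getLast?_cons_cons (a := c), hlastcu]
          exact hlast
      · have heq : List.replicate r ' ' = List.replicate k ' ' ++ List.replicate (r-k) ' ' := by
          rw [← List.replicate_add]; congr 1; omega
        rw [heq, List.append_assoc, pvRepFull (by omega)]
        have hne : pvRep k (List.replicate (r-k) ' ' ++ c :: u) ≠ [] := pvRepNe hk _ _ _ hc
        rw [show ' ' :: pvRep k (List.replicate (r-k) ' ' ++ c :: u)
            = [' '] ++ pvRep k (List.replicate (r-k) ' ' ++ c :: u) by simp,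
          List.getLast?_append_of_ne_nil _ hne]
        apply ih _ (by simp at hl ⊢; omega)
        rw [List.getLast?_append_of_ne_nil _ (by simp), hlastcu]
        exact hlast

theorem pvLoopAux : ∀ (j : Nat) (l : List Char), l.head? ≠ some ' ' → l.getLast? ≠ some ' ' →
    ¬(List.replicate (j+2) ' ' <:+: l) →
    pvNorm (List.foldl pvStep l (PySem.List.pyRange ((j+1 : Nat) : Int) 1 (-1))) = pvNorm l ∧
    (List.foldl pvStep l (PySem.List.pyRange ((j+1 : Nat) : Int) 1 (-1))).head? ≠ some ' ' ∧
    (List.foldl pvStep l (PySem.List.pyRange ((j+1 : Nat) : Int) 1 (-1))).getLast? ≠ some ' ' ∧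
    ¬(List.replicate 2 ' ' <:+: List.foldl pvStep l (PySem.List.pyRange ((j+1 : Nat) : Int) 1 (-1))) := by
  intro j
  induction j with
  | zero =>
    intro l hh hl hnr
    rw [PySem.List.pyRange_neg_one_eq_nil (by norm_num)]
    exact ⟨rfl, hh, hl, hnr⟩
  | succ j ih =>
    intro l hh hl hnr
    have hcons : PySem.List.pyRange ((j+2 : Nat) : Int) 1 (-1)
        = ((j+2 : Nat) : Int) :: PySem.List.pyRange ((j+1 : Nat) : Int) 1 (-1) := by
      have harg : ((j+2 : Nat) : Int) - 1 = ((j+1 : Nat) : Int) := by push_cast; ring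
      rw [PySem.List.pyRange_neg_one_cons (by exact_mod_cast Nat.one_lt_succ_succ j), harg]
    rw [hcons, List.foldl_cons]
    by_cases hin : PySem.Chars.isIn (List.replicate ((j+2 : Nat) : Int).toNat ' ') l = true
    · have hstep : pvStep l ((j+2 : Nat) : Int) = pvRep (j+2) l := by
        simp only [pvStep, hin, if_pos]
        rw [Int.toNat_natCast]
        exact pvReplaceEq (j+2) (by omega) l
      rw [hstep]
      have hrun := pvRepRun (j+2) (by omega) l.length l le_rfl (by simpa using hnr)
      have hnorm := (pvRepNorm (j+2) (by omega) l.length l le_rfl).1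
      have hhd := pvRepHead (j+2) (by omega) l hh
      have hlst := pvRepLast (j+2) (by omega) l.length l le_rfl hl
      obtain ⟨n1, n2, n3, n4⟩ := ih (pvRep (j+2) l) hhd hlst (by simpa using hrun)
      exact ⟨n1.trans hnorm, n2, n3, n4⟩
    · have hstep : pvStep l ((j+2 : Nat) : Int) = l := by
        simp only [pvStep]
        rw [if_neg hin]
      rw [hstep]
      have hrun : ¬(List.replicate (j+2) ' ' <:+: l) := by
        have := (PySem.Chars.isIn_eq_false_iff _ _).mp (by simpa using hin)
        simpa using this
      exact ih l hh hl hrun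

theorem pvLoop : ∀ (k : Nat) (l : List Char), 1 ≤ k → l.head? ≠ some ' ' → l.getLast? ≠ some ' ' →
    ¬(List.replicate (k+1) ' ' <:+: l) →
    pvNorm (List.foldl pvStep l (PySem.List.pyRange (k : Int) 1 (-1))) = pvNorm l ∧
    (List.foldl pvStep l (PySem.List.pyRange (k : Int) 1 (-1))).head? ≠ some ' ' ∧
    (List.foldl pvStep l (PySem.List.pyRange (k : Int) 1 (-1))).getLast? ≠ some ' ' ∧
    ¬(List.replicate 2 ' ' <:+: List.foldl pvStep l (PySem.List.pyRange (k : Int) 1 (-1))) := by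
  intro k l hk hh hl hnr
  obtain ⟨j, rfl⟩ : ∃ j, k = j + 1 := ⟨k - 1, by omega⟩
  exact pvLoopAux j l hh hl (by simpa using hnr)

theorem pvLastCons (a : Char) (l : List Char) (h : l ≠ []) : (a :: l).getLast? = l.getLast? := by
  cases l with
  | nil => exact absurd rfl h
  | cons b m => exact List.getLast?_cons_cons

theorem pvFixW : ∀ n, ∀ l : List Char, l.length ≤ n → ¬(List.replicate 2 ' ' <:+: l) →
    l.getLast? ≠ some ' ' → pvNormW l = l := by
  intro n
  induction n with
  | zero =>
    intro l hl _ _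
    have : l = [] := by cases l <;> simp_all
    subst this
    rfl
  | succ n ih =>
    intro l hl h2 hlast
    cases l with
    | nil => rfl
    | cons c t =>
      by_cases hc : c = ' '
      · subst hc
        cases t with
        | nil => simp at hlast
        | cons d u =>
          have hd : d ≠ ' ' := by
            intro hds
            subst hds
            exact h2 (show List.replicate 2 ' ' <+: _ by simp [List.replicate]).isInfix
          have hn : pvNorm (d :: u) = d :: pvNormW u := by simp [pvNorm, hd]
          have hwu : pvNormW u = u := by
            cases u with
            | nil => rfl
            | cons e v =>
              apply ih _ (by simp at hl ⊢; omega)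
              · intro h
                exact h2 (h.trans (((List.suffix_cons d _).trans (List.suffix_cons ' ' _))).isInfix)
              · rw [← pvLastCons d _ (by simp), ← pvLastCons ' ' _ (by simp)]
                exact hlast
          simp only [pvNormW, hn, hwu]
          simp
      · have hwt : pvNormW t = t := by
          cases t with
          | nil => rfl
          | cons e v =>
            apply ih _ (by simp at hl ⊢; omega)
            · intro h
              exact h2 (h.trans (List.suffix_cons c _).isInfix)
            · rw [← pvLastCons c _ (by simp)]
              exact hlast
        simp [pvNormW, hc, hwt]

theorem pvFix (l : List Char) (h2 : ¬(List.replicate 2 ' ' <:+: l)) (hh : l.head? ≠ some ' ')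
    (hl : l.getLast? ≠ some ' ') : pvNorm l = l := by
  cases l with
  | nil => rfl
  | cons c t =>
    have hc : c ≠ ' ' := by simpa using hh
    have hwt : pvNormW t = t := by
      cases t with
      | nil => rfl
      | cons e v =>
        apply pvFixW (e :: v).length _ le_rfl
        · intro h
          exact h2 (h.trans (List.suffix_cons c _).isInfix)
        · rw [← pvLastCons c _ (by simp)]
          exact hl
    simp [pvNorm, hc, hwt]

theorem pvLastSuffix (l : List Char) : l.getLast? = some ' ' ↔ [' '] <:+ l := by
  constructor
  · intro h
    obtain ⟨ys, rfl⟩ := List.getLast?_eq_some_iff.mp h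
    exact ⟨ys, rfl⟩
  · rintro ⟨t, rfl⟩
    exact List.getLast?_concat

theorem pvLstripEq : ∀ n (s : String), s.toList.length ≤ n →
    (pvLstrip s).toList = s.toList.dropWhile (· == ' ') := by
  intro n
  induction n with
  | zero =>
    intro s hs
    have h0 : s.toList = [] := by cases hsl : s.toList <;> simp_all
    rw [pvLstrip]
    have hsw : ¬ (PySem.Str.startswith s " " = true) := by
      intro h
      have := (PySem.Chars.startswith_iff s.toList (" ".toList)).mp (by simpa using h)
      rw [h0] at this
      simpa using this.length_le
    rw [dif_neg hsw]
    simp [h0]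
  | succ n ih =>
    intro s hs
    rw [pvLstrip]
    by_cases h : PySem.Str.startswith s " " = true
    · rw [dif_pos h]
      have hp : (" ".toList) <+: s.toList := (PySem.Chars.startswith_iff _ _).mp (by simpa using h)
      obtain ⟨t, ht⟩ := hp
      have htl : s.toList = ' ' :: t := by rw [← ht]; rfl
      have hsl : (PySem.Str.slice s (some 1) none).toList = t := by
        simp [PySem.List.slice_from_one, htl]
      rw [ih _ (by rw [hsl]; have := hs; rw [htl] at this; simp at this; omega)]
      rw [hsl, htl]
      simp
    · rw [dif_neg h]
      cases hsl : s.toList with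
      | nil => simp
      | cons c t =>
        have hc : c ≠ ' ' := by
          intro hcs
          subst hcs
          apply h
          simp only [PySem.Str.startswith]
          rw [PySem.Chars.startswith_iff]
          rw [hsl]
          exact (show (" ".toList) = [' '] from rfl) ▸ ⟨t, rfl⟩
        simp [hc]

theorem pvHeadDropWhile (l : List Char) : (l.dropWhile (· == ' ')).head? ≠ some ' ' := by
  induction l with
  | nil => simp
  | cons c t ih =>
    by_cases hc : c = ' '
    · simpa [List.dropWhile_cons, hc] using ih
    · simp [hc]

theorem pvNormDropWhile (l : List Char) : pvNorm (l.dropWhile (· == ' ')) = pvNorm l := by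
  induction l with
  | nil => rfl
  | cons c t ih =>
    by_cases hc : c = ' '
    · simpa [List.dropWhile_cons, hc, pvNorm] using ih
    · simp [hc]

theorem pvNormAppSp (x : List Char) :
    pvNorm (x ++ [' ']) = pvNorm x ∧ pvNormW (x ++ [' ']) = pvNormW x := by
  induction x with
  | nil => simp [pvNorm, pvNormW]
  | cons c t ih =>
    by_cases hc : c = ' '
    · subst hc
      constructor
      · simpa [pvNorm] using ih.1
      · simp only [List.cons_append, pvNormW, ih.1]
        simp
    · constructor
      · simp [pvNorm, hc, ih.2]
      · simp [pvNormW, hc, ih.2]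

theorem pvRstripProps : ∀ n (s : String), s.toList.length ≤ n →
    (pvRstrip s).toList.getLast? ≠ some ' ' ∧
    pvNorm (pvRstrip s).toList = pvNorm s.toList ∧
    (s.toList.head? ≠ some ' ' → (pvRstrip s).toList.head? ≠ some ' ') := by
  intro n
  induction n with
  | zero =>
    intro s hs
    have h0 : s.toList = [] := by cases hsl : s.toList <;> simp_all
    rw [pvRstrip]
    have hsw : ¬ (PySem.Str.endswith s " " = true) := by
      intro h
      have := (PySem.Chars.endswith_iff s.toList (" ".toList)).mp (by simpa using h)
      rw [h0] at this
      simpa using this.length_le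
    rw [dif_neg hsw]
    simp [h0]
  | succ n ih =>
    intro s hs
    rw [pvRstrip]
    by_cases h : PySem.Str.endswith s " " = true
    · rw [dif_pos h]
      have hp : (" ".toList) <:+ s.toList := (PySem.Chars.endswith_iff _ _).mp (by simpa using h)
      obtain ⟨t, ht⟩ := hp
      have htl : s.toList = t ++ [' '] := by rw [← ht]; rfl
      have hsl : (PySem.Str.slice s none (some (-1))).toList = t := by
        rw [PySem.Str.slice_to_neg_one, htl, List.dropLast_concat]
      obtain ⟨p1, p2, p3⟩ := ih (PySem.Str.slice s none (some (-1)))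
        (by rw [hsl]; rw [htl] at hs; simp at hs; omega)
      refine ⟨p1, ?_, ?_⟩
      · rw [p2, hsl, htl, (pvNormAppSp t).1]
      · intro hh
        apply p3
        rw [hsl]
        rw [htl] at hh
        cases t with
        | nil => simp
        | cons a u => simpa using hh
    · rw [dif_neg h]
      refine ⟨?_, rfl, fun hh => hh⟩
      intro hlast
      apply h
      simp only [PySem.Str.endswith]
      rw [PySem.Chars.endswith_iff]
      exact (show (" ".toList) = [' '] from rfl) ▸ (pvLastSuffix _).mp hlast

theorem pvFoldBridge : ∀ (rng : List Int) (x : String),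
    (rng.foldl (fun sng s =>
      let pat := String.ofList (PySem.List.pyRepeat [' '] s)
      if PySem.Str.isIn pat sng = true then PySem.Str.replace sng pat " " else sng) x).toList
      = rng.foldl pvStep x.toList := by
  intro rng
  induction rng with
  | nil => intro x; rfl
  | cons a rng' ih =>
    intro x
    rw [List.foldl_cons, List.foldl_cons, ih]
    congr 1
    show (if PySem.Str.isIn (String.ofList (PySem.List.pyRepeat [' '] a)) x = true
        then PySem.Str.replace x (String.ofList (PySem.List.pyRepeat [' '] a)) " " else x).toList
      = pvStep x.toList a
    have hpat : (String.ofList (PySem.List.pyRepeat [' '] a)).toList = List.replicate a.toNat ' ' := by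
      simp [PySem.List.pyRepeat_singleton]
    simp only [pvStep]
    by_cases hin : PySem.Chars.isIn (List.replicate a.toNat ' ') x.toList = true
    · rw [if_pos (by simpa [hpat] using hin), if_pos hin]
      simp
    · rw [if_neg (by simpa [hpat] using hin), if_neg hin]

theorem pvFoldB : ∀ (t out : List Char),
    t.foldl (fun out c =>
      if c ≠ ' ' then out ++ [c]
      else if out ≠ [] ∧ out.getLast? ≠ some ' ' then out ++ [' ']
      else out) out
    = out ++ (if out.getLast? = some ' ' ∨ out = [] then pvE t else pvG t) := by
  intro t
  induction t with
  | nil =>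
    intro out
    simp only [List.foldl_nil, pvE, pvG]
    split <;> simp
  | cons c t' ih =>
    intro out
    rw [List.foldl_cons]
    by_cases hc : c = ' '
    · subst hc
      by_cases hstate : out.getLast? = some ' ' ∨ out = []
      · have hcond : ¬(out ≠ [] ∧ out.getLast? ≠ some ' ') := by tauto
        simp only [if_neg (by simp : ¬(' ' ≠ ' ')), if_neg hcond]
        rw [ih out, if_pos hstate, if_pos hstate]
        simp [pvE]
      · have hcond : out ≠ [] ∧ out.getLast? ≠ some ' ' := by tauto
        simp only [if_neg (by simp : ¬(' ' ≠ ' ')), if_pos hcond]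
        rw [ih (out ++ [' '])]
        rw [if_pos (Or.inl List.getLast?_concat), if_neg hstate]
        simp [pvG]
    · simp only [if_pos hc]
      rw [ih (out ++ [c])]
      rw [if_neg (by
        rintro (h | h)
        · rw [List.getLast?_concat] at h
          exact hc (by simpa using h)
        · simp at h)]
      by_cases hstate : out.getLast? = some ' ' ∨ out = []
      · rw [if_pos hstate]
        simp [pvE, hc]
      · rw [if_neg hstate]
        simp [pvG, hc]

theorem pvScanNorm : ∀ t : List Char,
    (pvE t = [] ↔ pvNorm t = []) ∧ (pvG t = [] ↔ t = []) ∧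
    (if (pvE t).getLast? = some ' ' then (pvE t).dropLast else pvE t) = pvNorm t ∧
    (if (pvG t).getLast? = some ' ' then (pvG t).dropLast else pvG t) = pvNormW t := by
  intro t
  induction t with
  | nil => simp [pvE, pvG, pvNorm, pvNormW]
  | cons c t ih =>
    obtain ⟨ihE0, ihG0, ihE, ihG⟩ := ih
    by_cases hc : c = ' '
    · subst hc
      refine ⟨?_, ?_, ?_, ?_⟩
      · simpa [pvE, pvNorm] using ihE0
      · simp [pvG]
      · simpa [pvE, pvNorm] using ihE
      · have h1 : pvG (' ' :: t) = ' ' :: pvE t := by simp [pvG]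
        have h2 : pvNormW (' ' :: t) = if pvNorm t = [] then [] else ' ' :: pvNorm t := by
          simp [pvNormW]
        rw [h1, h2]
        by_cases hE : pvE t = []
        · rw [hE, if_pos (ihE0.mp hE)]
          simp
        · have hnne : pvNorm t ≠ [] := fun h => hE (ihE0.mpr h)
          rw [pvLastCons ' ' _ hE]
          by_cases hl : (pvE t).getLast? = some ' '
          · rw [if_pos hl, List.dropLast_cons_of_ne_nil hE, if_neg hnne]
            rw [if_pos hl] at ihE
            rw [ihE]
          · rw [if_neg hl, if_neg hnne]
            rw [if_neg hl] at ihE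
            rw [ihE]
    · have hEeq : pvE (c :: t) = c :: pvG t := by simp [pvE, hc]
      have hGeq : pvG (c :: t) = c :: pvG t := by simp [pvG, hc]
      have hNeq : pvNorm (c :: t) = c :: pvNormW t := by simp [pvNorm, hc]
      have hWeq : pvNormW (c :: t) = c :: pvNormW t := by simp [pvNormW, hc]
      have hcommon : (if (c :: pvG t).getLast? = some ' ' then (c :: pvG t).dropLast
          else c :: pvG t) = c :: pvNormW t := by
        by_cases hG : pvG t = []
        · rw [hG, ihG0.mp hG]
          simp [pvNormW, hc]
        · rw [pvLastCons c _ hG]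
          by_cases hl : (pvG t).getLast? = some ' '
          · rw [if_pos hl, List.dropLast_cons_of_ne_nil hG]
            rw [if_pos hl] at ihG
            rw [ihG]
          · rw [if_neg hl]
            rw [if_neg hl] at ihG
            rw [ihG]
      refine ⟨?_, ?_, ?_, ?_⟩
      · simp [hEeq, hNeq]
      · simp [hGeq]
      · rw [hEeq, hNeq]
        exact hcommon
      · rw [hGeq, hWeq]
        exact hcommon

theorem pvBSide (song : String) :
    (song_decoder_alt song).toList = pvNorm (PySem.Str.replace song "WUB" " ").toList := by
  unfold song_decoder_alt
  dsimp only
  rw [pvFoldB]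
  rw [if_pos (Or.inr rfl)]
  rw [List.nil_append]
  obtain ⟨hE0, -, hE, -⟩ := pvScanNorm (PySem.Str.replace song "WUB" " ").toList
  by_cases hl : (pvE (PySem.Str.replace song "WUB" " ").toList).getLast? = some ' '
  · have hne : pvE (PySem.Str.replace song "WUB" " ").toList ≠ [] := by
      intro h
      rw [h] at hl
      simp at hl
    rw [if_pos ⟨hne, hl⟩]
    rw [if_pos hl] at hE
    simpa using hE
  · rw [if_neg (by rintro ⟨-, h⟩; exact hl h)]
    rw [if_neg hl] at hE
    simpa using hE

theorem pvASide (song : String) :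
    (song_decoder song).toList = pvNorm (PySem.Str.replace song "WUB" " ").toList := by
  unfold song_decoder
  dsimp only
  rw [pvFoldBridge]
  have hs2 : (pvLstrip (PySem.Str.replace song "WUB" " ")).toList
      = (PySem.Str.replace song "WUB" " ").toList.dropWhile (· == ' ') :=
    pvLstripEq _ _ le_rfl
  obtain ⟨r1, r2, r3⟩ := pvRstripProps
    (pvLstrip (PySem.Str.replace song "WUB" " ")).toList.length _ le_rfl
  have hh3 : (pvRstrip (pvLstrip (PySem.Str.replace song "WUB" " "))).toList.head? ≠ some ' ' :=
    r3 (by rw [hs2]; exact pvHeadDropWhile _)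
  have hnorm3 : pvNorm (pvRstrip (pvLstrip (PySem.Str.replace song "WUB" " "))).toList
      = pvNorm (PySem.Str.replace song "WUB" " ").toList := by
    rw [r2, hs2, pvNormDropWhile]
  have hlen : PySem.Str.len (pvRstrip (pvLstrip (PySem.Str.replace song "WUB" " ")))
      = (((pvRstrip (pvLstrip (PySem.Str.replace song "WUB" " "))).toList.length : Nat) : Int) := by
    simp [PySem.Str.len]
  rw [hlen]
  cases hL : (pvRstrip (pvLstrip (PySem.Str.replace song "WUB" " "))).toList.length with
  | zero =>
    have h3nil : (pvRstrip (pvLstrip (PySem.Str.replace song "WUB" " "))).toList = [] := by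
      cases h : (pvRstrip (pvLstrip (PySem.Str.replace song "WUB" " "))).toList <;> simp_all
    rw [PySem.List.pyRange_neg_one_eq_nil (by simp)]
    rw [List.foldl_nil, h3nil, ← hnorm3, h3nil]
    rfl
  | succ m =>
    obtain ⟨n1, n2, n3, n4⟩ := pvLoop (m+1)
      (pvRstrip (pvLstrip (PySem.Str.replace song "WUB" " "))).toList (by omega) hh3 r1 (by
        intro hinf
        have := hinf.length_le
        rw [hL] at this
        simp at this)
    calc List.foldl pvStep (pvRstrip (pvLstrip (PySem.Str.replace song "WUB" " "))).toList
          (PySem.List.pyRange ((m+1 : Nat) : Int) 1 (-1))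
        = pvNorm (List.foldl pvStep (pvRstrip (pvLstrip (PySem.Str.replace song "WUB" " "))).toList
            (PySem.List.pyRange ((m+1 : Nat) : Int) 1 (-1))) := (pvFix _ n4 n2 n3).symm
      _ = pvNorm (pvRstrip (pvLstrip (PySem.Str.replace song "WUB" " "))).toList := n1
      _ = pvNorm (PySem.Str.replace song "WUB" " ").toList := hnorm3

theorem pvMain (song : String) : (song_decoder song).toList = (song_decoder_alt song).toList := by
  rw [pvASide, pvBSide]

-- ===== VERDICT (by name: the statement is the Claim_ definition above) =====
theorem song_decoder_spec : Claim_equal_song_decoder := by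
  intro song _
  unfold Spec_song_decoder
  exact String.toList_inj.mp (pvMain song)
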